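-- pv_equiv track=rewrite | github.com/KillyBOT/AI_Programs | SudokuSolverNewNew.py | clique_is_valid
-- ===== SOURCE A (Python) =====
-- def clique_is_valid(clique):
--     vals = set()
--     for val in clique:
--         if val != 0 and val in vals:
--             return False
--         else:
--             vals.add(val)
--
--     return True
-- ===== SOURCE B (Python) =====
-- def clique_is_valid(clique):
--     s = sorted(clique)
--     return all(a != b or a == 0 for a, b in zip(s, s[1:]))
-- ===== Notes on version B (the rewrite author's own statement) =====
-- stated objective: alternative
-- what changed: Replaces the hash-set early-exit loop with a sort-then-scan: sort the list, then check that no two adjacent elements are equal and nonzero (in a sorted list duplicates are adjacent), maintaining no membership structure at all.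
import Mathlib
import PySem

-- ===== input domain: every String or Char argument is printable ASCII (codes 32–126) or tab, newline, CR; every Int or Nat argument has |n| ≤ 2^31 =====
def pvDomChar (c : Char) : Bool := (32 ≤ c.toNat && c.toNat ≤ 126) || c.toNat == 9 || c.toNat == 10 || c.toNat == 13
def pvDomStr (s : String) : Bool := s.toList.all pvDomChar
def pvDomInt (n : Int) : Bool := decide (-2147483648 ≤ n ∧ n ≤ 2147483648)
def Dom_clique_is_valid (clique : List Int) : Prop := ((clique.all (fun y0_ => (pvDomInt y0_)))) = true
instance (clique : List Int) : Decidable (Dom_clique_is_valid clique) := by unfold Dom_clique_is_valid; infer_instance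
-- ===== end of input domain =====

-- B replaces A's hash-set early-exit loop by sort-then-adjacent-scan: sort the list and
-- check no adjacent pair is equal and nonzero; objective: alternative (no membership structure).

-- ===== PORT A =====
-- the 'for val in clique' loop carrying the mutable set 'vals'; returns False early on a repeat
def cliqueLoopA : List Int → PySem.Set Int → Bool
  | [], _ => true
  | val :: rest, vals =>
    if val ≠ 0 ∧ val ∈ vals then false
    else cliqueLoopA rest (PySem.Set.add vals val)

def clique_is_valid (clique : List Int) : Bool :=
  cliqueLoopA clique PySem.Set.empty

-- ===== PORT B =====
-- s = sorted(clique); all(a != b or a == 0 for a, b in zip(s, s[1:]))  (s[1:] = s.tail)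
def clique_is_valid_alt (clique : List Int) : Bool :=
  let s := PySem.List.sorted clique (fun x => x) false
  (s.zip (PySem.List.slice s (some 1) none)).all fun p => !(p.1 == p.2) || (p.1 == 0)

-- ===== PRECONDITION & SPEC =====
def Spec_clique_is_valid (clique : List Int) (out : Bool) : Prop := out = clique_is_valid_alt clique
instance (clique : List Int) (out : Bool) : Decidable (Spec_clique_is_valid clique out) := by unfold Spec_clique_is_valid; infer_instance

-- ===== CLAIM (what is proved, stated in full; the proofs are below) =====
def Claim_equal_clique_is_valid : Prop := ∀ (clique : List Int), Dom_clique_is_valid clique → Spec_clique_is_valid clique (clique_is_valid clique)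

-- ===== LEMMAS AND PROOFS =====

-- A's loop succeeds iff the nonzero values of the remaining list are pairwise distinct
-- and none of them is already in the accumulator set.
theorem cliqueLoopA_eq_true_iff (l : List Int) :
    ∀ s : PySem.Set Int, cliqueLoopA l s = true ↔
      ((l.filter (fun v => v ≠ 0)).Nodup ∧ ∀ v ∈ l, v ≠ 0 → v ∉ s) := by
  induction l with
  | nil => intro s; simp [cliqueLoopA]
  | cons x xs ih =>
    intro s
    by_cases hx : x ≠ 0 ∧ x ∈ s
    · simp only [cliqueLoopA, if_pos hx]
      constructor
      · intro h; exact absurd h (by simp)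
      · rintro ⟨-, h⟩; exact absurd hx.2 (h x List.mem_cons_self hx.1)
    · simp only [cliqueLoopA, if_neg hx, ih]
      by_cases hx0 : x = 0
      · subst hx0
        simp only [List.filter_cons, decide_not, decide_true, Bool.not_true,
          Bool.false_eq_true, if_false]
        constructor
        · rintro ⟨hn, h⟩
          refine ⟨hn, fun v hv hv0 => ?_⟩
          rcases List.mem_cons.mp hv with h0 | hmem
          · exact absurd h0 hv0
          · have := h v hmem hv0
            rw [PySem.Set.mem_add] at this
            push Not at this
            exact this.1
        · rintro ⟨hn, h⟩
          refine ⟨hn, fun v hv hv0 => ?_⟩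
          rw [PySem.Set.mem_add]
          push Not
          exact ⟨h v (List.mem_cons_of_mem _ hv) hv0, hv0⟩
      · push Not at hx
        have hxs : x ∉ s := hx hx0
        simp only [List.filter_cons, decide_not]
        rw [if_pos (by simpa using hx0), List.nodup_cons]
        constructor
        · rintro ⟨hn, h⟩
          refine ⟨⟨fun hmem => ?_, hn⟩, fun v hv hv0 => ?_⟩
          · have hmem' : x ∈ xs := (List.mem_filter.mp hmem).1
            have := h x hmem' hx0
            rw [PySem.Set.mem_add] at this
            exact this (Or.inr rfl)
          · rcases List.mem_cons.mp hv with h0 | hmem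
            · subst h0; exact hxs
            · have := h v hmem hv0
              rw [PySem.Set.mem_add] at this
              push Not at this
              exact this.1
        · rintro ⟨⟨hxn, hn⟩, h⟩
          refine ⟨hn, fun v hv hv0 => ?_⟩
          rw [PySem.Set.mem_add]
          push Not
          refine ⟨h v (List.mem_cons_of_mem _ hv) hv0, fun hvx => ?_⟩
          exact hxn (List.mem_filter.mpr ⟨hvx ▸ hv, by simpa using hx0⟩)

-- In a ≤-sorted list, no adjacent equal-nonzero pair ↔ the nonzero values are pairwise distinct.
theorem adj_iff : ∀ (s : List Int), s.Pairwise (· ≤ ·) →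
    (((s.zip s.tail).all fun p => !(p.1 == p.2) || (p.1 == 0)) = true ↔
      (s.filter (fun v => decide (v ≠ 0))).Nodup) := by
  intro s
  induction s with
  | nil => intro _; simp
  | cons a s ih =>
    intro hp
    cases s with
    | nil =>
      constructor
      · intro _
        exact List.Sublist.nodup List.filter_sublist (List.nodup_singleton a)
      · intro _; simp
    | cons b t =>
      have hp' : (b :: t).Pairwise (· ≤ ·) := hp.tail
      have hab : a ≤ b := (List.pairwise_cons.mp hp).1 b List.mem_cons_self
      simp only [List.tail_cons, List.zip_cons_cons, List.all_cons, Bool.and_eq_true]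
      simp only [List.tail_cons] at ih
      rw [ih hp']
      by_cases ha0 : a = 0
      · subst ha0
        conv_rhs => rw [List.filter_cons, if_neg (by simp)]
        exact ⟨fun h => h.2, fun h => ⟨by simp, h⟩⟩
      · by_cases hab' : a = b
        · have hb0 : ¬ b = 0 := hab' ▸ ha0
          have hmem : a ∈ List.filter (fun v => decide (v ≠ 0)) (b :: t) :=
            List.mem_filter.mpr ⟨by simp [hab'], by simpa using ha0⟩
          conv_rhs => rw [List.filter_cons, if_pos (by simpa using ha0)]
          rw [List.nodup_cons]
          constructor
          · rintro ⟨h, -⟩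
            exact absurd h (by simp [hab', hb0])
          · rintro ⟨hna, -⟩
            exact absurd hmem hna
        · have hnotmem : a ∉ b :: t := by
            intro hmem
            rcases List.mem_cons.mp hmem with h | h
            · exact hab' h
            · have hba : b ≤ a := (List.pairwise_cons.mp hp').1 a h
              exact hab' (le_antisymm hab hba)
          have hnf : a ∉ List.filter (fun v => decide (v ≠ 0)) (b :: t) := fun h =>
            hnotmem (List.mem_filter.mp h).1
          have hcond : (!(a == b) || (a == 0)) = true := by simp [hab']
          conv_rhs => rw [List.filter_cons, if_pos (by simpa using ha0)]
          rw [List.nodup_cons]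
          exact ⟨fun h => ⟨hnf, h.2⟩, fun h => ⟨hcond, h.2⟩⟩

-- B's sorted-adjacent scan holds exactly when the nonzero values of the input are distinct
theorem alt_iff (clique : List Int) :
    clique_is_valid_alt clique = true ↔
      (clique.filter (fun v => decide (v ≠ 0))).Nodup := by
  simp only [clique_is_valid_alt, PySem.List.slice_from_one]
  rw [adj_iff _ (by simpa using PySem.List.sorted_pairwise clique (fun x => x))]
  exact ((PySem.List.sorted_perm clique (fun x => x) false).filter _).nodup_iff

-- ===== VERDICT (by name: the statement is the Claim_ definition above) =====
theorem clique_is_valid_spec : Claim_equal_clique_is_valid := by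
  intro clique _
  unfold Spec_clique_is_valid clique_is_valid
  rw [Bool.eq_iff_iff, cliqueLoopA_eq_true_iff, alt_iff]
  simp [PySem.Set.empty]
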